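-- pv_equiv track=rewrite | github.com/xkenzzo31/dofus-retro-deobfuscator | scripts/trace_closures.py | group_wrappers_by_scope
-- ===== SOURCE A (Python) =====
-- def group_wrappers_by_scope(func_defs, wrappers):
--     """Group wrapper functions by their parent scope (consecutive wrapper blocks)."""
--     groups = []
--     current_group = []
--
--     for fd in func_defs:
--         if fd["name"] in wrappers:
--             current_group.append(fd["name"])
--         else:
--             if current_group:
--                 groups.append(current_group)
--                 current_group = []
--     if current_group:
--         groups.append(current_group)
--
--     wrapper_to_group = {}
--     for gi, group in enumerate(groups):
--         for name in group:
--             wrapper_to_group[name] = gi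
--
--     return groups, wrapper_to_group
-- ===== SOURCE B (Python) =====
-- def group_wrappers_by_scope(func_defs, wrappers):
--     """Group wrapper functions by their parent scope (consecutive wrapper blocks)."""
--     wset = set(wrappers)
--     names = [fd["name"] for fd in func_defs]
--     flags = [nm in wset for nm in names]
--     # a position starts a new group iff it is a wrapper and the previous one is not
--     starts = [f and not q for f, q in zip(flags, [False] + flags[:-1])]
--     labels = []
--     t = 0
--     for s in starts:  # prefix sum of start indicators: 1-based group id per position
--         t += 1 if s else 0
--         labels.append(t)
--     ngroups = labels[-1] if labels else 0
--     groups = [[] for _ in range(ngroups)]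
--     for nm, f, lab in zip(names, flags, labels):
--         if f:
--             groups[lab - 1].append(nm)
--     wrapper_to_group = {nm: lab - 1 for nm, f, lab in zip(names, flags, labels) if f}
--     return groups, wrapper_to_group
-- ===== Notes on version B (the rewrite author's own statement) =====
-- stated objective: alternative
-- what changed: Replaces A's online accumulator/flush state machine by a staged label-then-scatter pipeline: compute boolean flags, mark run starts by zipping flags with their shift, prefix-sum the start indicators into a group label per position, then scatter names into preallocated buckets and build the index by a dict comprehension over the labelled positions.
import Mathlib
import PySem

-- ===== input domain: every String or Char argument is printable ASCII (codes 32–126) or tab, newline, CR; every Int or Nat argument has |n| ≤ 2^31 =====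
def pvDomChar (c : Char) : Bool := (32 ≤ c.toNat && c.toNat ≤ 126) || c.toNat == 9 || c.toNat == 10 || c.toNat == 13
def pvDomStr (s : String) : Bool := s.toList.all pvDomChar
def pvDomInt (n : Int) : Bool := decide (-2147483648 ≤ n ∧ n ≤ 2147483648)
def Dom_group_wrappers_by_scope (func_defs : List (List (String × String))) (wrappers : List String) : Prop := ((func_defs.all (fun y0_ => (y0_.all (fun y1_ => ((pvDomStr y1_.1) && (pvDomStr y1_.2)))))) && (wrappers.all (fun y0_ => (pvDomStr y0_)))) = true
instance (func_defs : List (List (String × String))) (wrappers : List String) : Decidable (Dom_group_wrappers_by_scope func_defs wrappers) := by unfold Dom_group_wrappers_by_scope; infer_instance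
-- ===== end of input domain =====

-- B replaces A's accumulator/flush state machine by a staged pipeline: flag each name, mark
-- run starts by zipping flags with their shift, prefix-sum the starts into per-position group
-- labels, then scatter names into preallocated buckets (objective: alternative decomposition).

-- ===== PORT A =====
-- fd["name"] raises KeyError when the key is missing; Pre_ excludes that, so a first-match
-- lookup with default "" (List.lookup = Python dict first-match lookup) is exact here.
def group_wrappers_by_scope (func_defs : List (List (String × String))) (wrappers : List String) : List (List String) × (List (String × Int)) :=
  let st := func_defs.foldl
    (fun (st : List (List String) × List String) fd =>
      let name := (List.lookup "name" fd).getD ""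
      if wrappers.contains name then
        (st.1, st.2 ++ [name])
      else if st.2 = [] then st else (st.1 ++ [st.2], []))
    ([], [])
  let groups := if st.2 = [] then st.1 else st.1 ++ [st.2]
  let w2g := (PySem.List.enumerate groups 0).foldl
    (fun d gg => gg.2.foldl (fun d name => PySem.Dict.insert d name gg.1) d)
    PySem.Dict.empty
  (groups, w2g.items)

-- ===== PORT B =====
def group_wrappers_by_scope_alt (func_defs : List (List (String × String))) (wrappers : List String) : List (List String) × (List (String × Int)) :=
  let wset : PySem.Set String := PySem.Set.ofList wrappers
  let names := func_defs.map (fun fd => (List.lookup "name" fd).getD "")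
  let flags := names.map (fun nm => PySem.Set.contains wset nm)
  -- starts = [f and not q for f, q in zip(flags, [False] + flags[:-1])]  (zip truncates)
  let starts := List.zipWith (fun f q => f && !q) flags (false :: flags.dropLast)
  -- t = 0; for s in starts: t += 1 if s else 0; labels.append(t)
  let labels := (starts.foldl (fun (st : Int × List Int) s =>
      let t := st.1 + (if s then 1 else 0); (t, st.2 ++ [t])) (0, [])).2
  -- ngroups = labels[-1] if labels else 0  (a count, hence ≥ 0: .toNat below is exact)
  let ngroups : Int := labels.getLast?.getD 0
  let z := names.zip (flags.zip labels)
  -- for nm, f, lab in zip(...): if f: groups[lab-1].append(nm)  (lab ≥ 1 whenever f holds)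
  let groups := z.foldl
    (fun (gs : List (List String)) q =>
      if q.2.1 then gs.modify (q.2.2 - 1).toNat (fun g => g ++ [q.1]) else gs)
    (List.replicate ngroups.toNat [])
  -- wrapper_to_group = {nm: lab - 1 for nm, f, lab in zip(...) if f}
  let w2g := z.foldl
    (fun (d : PySem.Dict String Int) q =>
      if q.2.1 then PySem.Dict.insert d q.1 (q.2.2 - 1) else d)
    PySem.Dict.empty
  (groups, w2g.items)

-- ===== PRECONDITION & SPEC =====
-- Pre_ excludes exactly the inputs where A raises KeyError: some fd without a "name" key.
def Pre_group_wrappers_by_scope (func_defs : List (List (String × String))) (wrappers : List String) : Prop :=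
  ∀ fd ∈ func_defs, (List.lookup "name" fd).isSome = true
instance (func_defs : List (List (String × String))) (wrappers : List String) : Decidable (Pre_group_wrappers_by_scope func_defs wrappers) := by unfold Pre_group_wrappers_by_scope; infer_instance

def pvWitness_group_wrappers_by_scope : (List (List (String × String))) × List String :=
  ([[("name", "f")], [("name", "g")], [("name", "x")], [("name", "h")]], ["f", "g", "h"])

def Spec_group_wrappers_by_scope (func_defs : List (List (String × String))) (wrappers : List String) (out : List (List String) × (List (String × Int))) : Prop := out = group_wrappers_by_scope_alt func_defs wrappers
instance (func_defs : List (List (String × String))) (wrappers : List String) (out : List (List String) × (List (String × Int))) : Decidable (Spec_group_wrappers_by_scope func_defs wrappers out) := by unfold Spec_group_wrappers_by_scope; infer_instance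

-- ===== CLAIM (what is proved, stated in full; the proofs are below) =====
def Claim_equal_group_wrappers_by_scope : Prop := ∀ (func_defs : List (List (String × String))) (wrappers : List String), Dom_group_wrappers_by_scope func_defs wrappers → Pre_group_wrappers_by_scope func_defs wrappers → Spec_group_wrappers_by_scope func_defs wrappers (group_wrappers_by_scope func_defs wrappers)

-- ===== LEMMAS AND PROOFS =====

-- reference grouping: maximal runs of p-elements, structurally
def gSpec (p : String → Bool) : List String → List (List String)
  | [] => []
  | x :: xs =>
    if p x then (x :: xs.takeWhile p) :: gSpec p (xs.dropWhile p)
    else gSpec p xs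
termination_by l => l.length
decreasing_by
  · have := List.length_dropWhile_le p xs; simp; omega
  · simp

theorem gSpec_cons_pos (p : String → Bool) (x : String) (xs : List String) (h : p x = true) :
    gSpec p (x :: xs) = (x :: xs.takeWhile p) :: gSpec p (xs.dropWhile p) := by
  simp [gSpec, h]

theorem gSpec_cons_neg (p : String → Bool) (x : String) (xs : List String) (h : p x = false) :
    gSpec p (x :: xs) = gSpec p xs := by
  simp [gSpec, h]

-- A's loop, finalized, equals the reference grouping (generalized over the running state)
def finishG (p : String → Bool) (cur : List String) (xs : List String) : List (List String) :=
  if cur = [] then gSpec p xs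
  else (cur ++ xs.takeWhile p) :: gSpec p (xs.dropWhile p)

theorem loopA_eq (p : String → Bool) (xs : List String) :
    ∀ (groups : List (List String)) (cur : List String),
    (let st := xs.foldl
      (fun (st : List (List String) × List String) x =>
        if p x then (st.1, st.2 ++ [x])
        else if st.2 = [] then st else (st.1 ++ [st.2], [])) (groups, cur)
     if st.2 = [] then st.1 else st.1 ++ [st.2]) = groups ++ finishG p cur xs := by
  induction xs with
  | nil =>
    intro groups cur
    by_cases hc : cur = [] <;> simp [hc, finishG, gSpec]
  | cons x xs ih =>
    intro groups cur
    by_cases hp : p x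
    · simp only [List.foldl_cons, hp, if_pos]
      rw [ih groups (cur ++ [x])]
      congr 1
      have hne : cur ++ [x] ≠ [] := by simp
      by_cases hc : cur = []
      · simp [finishG, hc, gSpec, hp]
      · simp [finishG, hc, hne, List.takeWhile_cons_of_pos hp, List.dropWhile_cons_of_pos hp]
    · simp only [List.foldl_cons, hp, if_neg, Bool.false_eq_true, not_false_eq_true]
      by_cases hc : cur = []
      · rw [if_pos hc, hc, ih groups []]
        congr 1
        simp [finishG, gSpec, hp]
      · rw [if_neg hc, ih (groups ++ [cur]) []]
        simp only [finishG, hc, if_pos, List.append_assoc]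
        congr 1
        simp [List.takeWhile_cons_of_neg, List.dropWhile_cons_of_neg, hp, gSpec]

theorem contains_ofList_eq (wrappers : List String) (x : String) :
    PySem.Set.contains (PySem.Set.ofList wrappers) x = wrappers.contains x := by
  by_cases h : x ∈ wrappers <;>
    simp [PySem.Set.mem_ofList, h]

-- B's staged lists, recursively: the run-start indicators …
def startsR : List Bool → Bool → List Bool
  | [], _ => []
  | f :: fs, pr => (f && !pr) :: startsR fs f

theorem zip_shift (l : List Bool) (pr : Bool) :
    List.zipWith (fun f q => f && !q) l (pr :: l.dropLast) = startsR l pr := by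
  induction l generalizing pr with
  | nil => rfl
  | cons f fs ih =>
    cases fs with
    | nil => simp [startsR]
    | cons f' fs' =>
      rw [List.dropLast_cons₂, List.zipWith_cons_cons, ih f]
      rfl

-- … their prefix sums …
def sums : List Bool → Int → List Int
  | [], _ => []
  | s :: ss, t => (t + (if s then 1 else 0)) :: sums ss (t + (if s then 1 else 0))

theorem foldl_sums (ss : List Bool) (t : Int) (acc : List Int) :
    (ss.foldl (fun (st : Int × List Int) s =>
      let t := st.1 + (if s then 1 else 0); (t, st.2 ++ [t])) (t, acc)).2 = acc ++ sums ss t := by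
  induction ss generalizing t acc with
  | nil => simp [sums]
  | cons s ss ih => simp [sums, ih]

-- … and the labels on the original names, with previous flag pr and running count t
def labs (p : String → Bool) : List String → Bool → Int → List Int
  | [], _, _ => []
  | x :: xs, pr, t =>
    (t + (if p x && !pr then 1 else 0)) :: labs p xs (p x) (t + (if p x && !pr then 1 else 0))

theorem sums_startsR (p : String → Bool) (names : List String) (pr : Bool) (t : Int) :
    sums (startsR (names.map p) pr) t = labs p names pr t := by
  induction names generalizing pr t with
  | nil => rfl
  | cons x xs ih => simp [startsR, sums, labs, ih]

-- the (name, label-1) pairs at flagged positions, recursively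
def FB (p : String → Bool) : List String → Bool → Int → List (String × Int)
  | [], _, _ => []
  | x :: xs, pr, t =>
    (if p x then [(x, t + (if p x && !pr then 1 else 0) - 1)] else []) ++
      FB p xs (p x) (t + (if p x && !pr then 1 else 0))

-- the two filtered folds over the zipped staged lists are the same folds over the FB pairs
theorem grp_fold_FB (p : String → Bool) (names : List String) (pr : Bool) (t : Int)
    (acc : List (List String)) :
    ((names.zip ((names.map p).zip (labs p names pr t))).foldl
      (fun (gs : List (List String)) q =>
        if q.2.1 then gs.modify (q.2.2 - 1).toNat (fun g => g ++ [q.1]) else gs) acc)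
    = (FB p names pr t).foldl
        (fun (gs : List (List String)) (q : String × Int) =>
          gs.modify q.2.toNat (fun g => g ++ [q.1])) acc := by
  induction names generalizing pr t acc with
  | nil => rfl
  | cons x xs ih =>
    by_cases hp : p x <;> simp [labs, FB, hp, ih, -Int.pred_toNat]

theorem dict_fold_FB (p : String → Bool) (names : List String) (pr : Bool) (t : Int)
    (d : PySem.Dict String Int) :
    ((names.zip ((names.map p).zip (labs p names pr t))).foldl
      (fun (d : PySem.Dict String Int) q =>
        if q.2.1 then PySem.Dict.insert d q.1 (q.2.2 - 1) else d) d)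
    = (FB p names pr t).foldl
        (fun (d : PySem.Dict String Int) (q : String × Int) =>
          PySem.Dict.insert d q.1 q.2) d := by
  induction names generalizing pr t d with
  | nil => rfl
  | cons x xs ih =>
    by_cases hp : p x <;> simp [labs, FB, hp, ih]

-- inside a run: all elements get the current label
theorem FB_true (p : String → Bool) (names : List String) (t : Int) :
    FB p names true t
      = (names.takeWhile p).map (fun nm => (nm, t - 1)) ++ FB p (names.dropWhile p) false t := by
  induction names generalizing t with
  | nil => rfl
  | cons x xs ih =>
    by_cases hp : p x
    · simp [FB, hp, List.takeWhile_cons_of_pos hp, List.dropWhile_cons_of_pos hp, ih]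
    · simp [FB, hp, List.takeWhile_cons_of_neg hp, List.dropWhile_cons_of_neg hp]

-- from a fresh state, the FB pairs are exactly the flattened enumerated reference groups
theorem FB_false (p : String → Bool) (names : List String) (t : Int) :
    FB p names false t
      = (PySem.List.enumerate (gSpec p names) t).flatMap
          (fun gg => gg.2.map (fun nm => (nm, gg.1))) := by
  cases names with
  | nil => simp [FB, gSpec, PySem.List.enumerate_nil]
  | cons x xs =>
    by_cases hp : p x
    · rw [show FB p (x :: xs) false t = (x, t) :: FB p xs true (t + 1) by
        simp [FB, hp, add_sub_cancel_right]]
      rw [FB_true, FB_false p (xs.dropWhile p) (t + 1), gSpec_cons_pos p x xs hp,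
        PySem.List.enumerate_cons]
      simp [add_sub_cancel_right]
    · rw [show FB p (x :: xs) false t = FB p xs false t by simp [FB, hp],
        FB_false p xs t, gSpec_cons_neg p x xs (by simpa using hp)]
termination_by names.length
decreasing_by
  · have := List.length_dropWhile_le p xs; simp; omega
  · simp

-- last label from a fresh state counts the reference groups
def lastD : List Int → Int → Int
  | [], d => d
  | a :: l, _ => lastD l a

theorem getLast?_lastD (l : List Int) (d : Int) :
    l.getLast?.getD d = lastD l d := by
  induction l generalizing d with
  | nil => rfl
  | cons a l ih =>
    cases l with
    | nil => rfl
    | cons b l' => rw [List.getLast?_cons_cons]; exact ih a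

theorem lastD_labs (p : String → Bool) (names : List String) (pr : Bool) (t : Int) :
    lastD (labs p names pr t) t
      = t + (if pr then ((gSpec p (names.dropWhile p)).length : Int)
             else ((gSpec p names).length : Int)) := by
  induction names generalizing pr t with
  | nil => cases pr <;> simp [labs, lastD, gSpec]
  | cons x xs ih =>
    by_cases hp : p x
    · cases pr
      · rw [show labs p (x :: xs) false t = (t + 1) :: labs p xs true (t + 1) by simp [labs, hp]]
        rw [show lastD ((t+1) :: labs p xs true (t+1)) t = lastD (labs p xs true (t+1)) (t+1) from rfl,
          ih, gSpec_cons_pos p x xs hp]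
        simp; ring
      · rw [show labs p (x :: xs) true t = t :: labs p xs true t by simp [labs, hp]]
        rw [show lastD (t :: labs p xs true t) t = lastD (labs p xs true t) t from rfl, ih,
          List.dropWhile_cons_of_pos hp]
        simp
    · have hp' : p x = false := by simpa using hp
      cases pr
      · rw [show labs p (x :: xs) false t = t :: labs p xs false t by simp [labs, hp']]
        rw [show lastD (t :: labs p xs false t) t = lastD (labs p xs false t) t from rfl, ih,
          gSpec_cons_neg p x xs hp']
        simp
      · rw [show labs p (x :: xs) true t = t :: labs p xs false t by simp [labs, hp']]
        rw [show lastD (t :: labs p xs false t) t = lastD (labs p xs false t) t from rfl, ih,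
          List.dropWhile_cons_of_neg (by simp [hp']), gSpec_cons_neg p x xs hp']
        simp

-- scatter lemmas
theorem modify_modify {α : Type} (l : List α) (i : Nat) (f g : α → α) :
    (l.modify i f).modify i g = l.modify i (fun a => g (f a)) := by
  induction l generalizing i with
  | nil => simp
  | cons a l ih =>
    cases i with
    | zero => simp [List.modify_cons]
    | succ j => simp [ih]

theorem foldl_modify_group (g : List String) (k : Int) (acc : List (List String)) :
    ((g.map (fun nm => (nm, k))).foldl
      (fun acc (q : String × Int) => acc.modify q.2.toNat (fun gg => gg ++ [q.1])) acc)
    = acc.modify k.toNat (fun gg => gg ++ g) := by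
  induction g generalizing acc with
  | nil =>
    simp only [List.map_nil, List.foldl_nil]
    rw [show (fun gg : List String => gg ++ []) = id by funext gg; simp, List.modify_id]
  | cons nm g ih =>
    simp only [List.map_cons, List.foldl_cons, ih, modify_modify]
    congr 1
    funext gg
    simp

theorem modify_at {α : Type} (pre : List α) (y : α) (rest : List α) (f : α → α) :
    (pre ++ y :: rest).modify pre.length f = pre ++ f y :: rest := by
  induction pre with
  | nil => simp [List.modify_cons]
  | cons a pre ih => simp [ih]

theorem bucket (gs : List (List String)) : ∀ (pre : List (List String)),
    (((PySem.List.enumerate gs (pre.length : Int)).flatMap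
        (fun gg => gg.2.map (fun nm => (nm, gg.1)))).foldl
      (fun acc (q : String × Int) => acc.modify q.2.toNat (fun g => g ++ [q.1]))
      (pre ++ List.replicate gs.length ([] : List String)))
    = pre ++ gs := by
  induction gs with
  | nil => intro pre; simp [PySem.List.enumerate_nil]
  | cons g gs ih =>
    intro pre
    rw [PySem.List.enumerate_cons, List.flatMap_cons, List.foldl_append, foldl_modify_group]
    have h1 : pre ++ List.replicate (g :: gs).length ([] : List String)
        = pre ++ ([] : List String) :: List.replicate gs.length [] := by simp [List.replicate]
    rw [h1, Int.toNat_natCast, modify_at]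
    have h2 : pre ++ ([] ++ g) :: List.replicate gs.length ([] : List String)
        = (pre ++ [g]) ++ List.replicate gs.length [] := by simp
    have h3 : (pre.length : Int) + 1 = ((pre ++ [g]).length : Int) := by simp
    rw [h2, h3, ih (pre ++ [g])]
    simp

-- dict built from the flattened pairs = A's nested insertion loops
theorem foldl_flatMap_dict (l : List (Int × List String)) :
    ∀ (d : PySem.Dict String Int),
    ((l.flatMap (fun gg => gg.2.map (fun name => (name, gg.1)))).foldl
        (fun d (p : String × Int) => PySem.Dict.insert d p.1 p.2) d)
      = l.foldl (fun d gg => gg.2.foldl (fun d name => PySem.Dict.insert d name gg.1) d) d := by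
  induction l with
  | nil => intro d; rfl
  | cons gg l ih =>
    intro d
    simp only [List.flatMap_cons, List.foldl_append, List.foldl_cons, ih, List.foldl_map]

theorem lastD_labs0 (p : String → Bool) (names : List String) :
    lastD (labs p names false 0) 0 = ((gSpec p names).length : Int) := by
  rw [lastD_labs]; simp

theorem bucket0 (gs : List (List String)) :
    (((PySem.List.enumerate gs 0).flatMap
        (fun gg => gg.2.map (fun nm => (nm, gg.1)))).foldl
      (fun (acc : List (List String)) (q : String × Int) =>
        acc.modify q.2.toNat (fun g => g ++ [q.1]))
      (List.replicate gs.length ([] : List String)))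
    = gs := by
  have h := bucket gs []
  simpa using h

-- ===== VERDICT (by name: the statement is the Claim_ definition above) =====
theorem group_wrappers_by_scope_spec : Claim_equal_group_wrappers_by_scope := by
  intro func_defs wrappers _ _
  unfold Spec_group_wrappers_by_scope group_wrappers_by_scope group_wrappers_by_scope_alt
  simp only [contains_ofList_eq]
  have hfold :
      func_defs.foldl
        (fun (st : List (List String) × List String) fd =>
          let name := (List.lookup "name" fd).getD ""
          if wrappers.contains name then (st.1, st.2 ++ [name])
          else if st.2 = [] then st else (st.1 ++ [st.2], []))
        ([], [])
      = (func_defs.map (fun fd => (List.lookup "name" fd).getD "")).foldl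
        (fun (st : List (List String) × List String) x =>
          if wrappers.contains x then (st.1, st.2 ++ [x])
          else if st.2 = [] then st else (st.1 ++ [st.2], []))
        ([], []) := by
    rw [List.foldl_map]
  have hgroups := loopA_eq (fun nm => wrappers.contains nm)
    (func_defs.map (fun fd => (List.lookup "name" fd).getD "")) [] []
  simp only [finishG, if_pos] at hgroups
  have hlabels :
      ((List.zipWith (fun f q => f && !q)
          ((func_defs.map (fun fd => (List.lookup "name" fd).getD "")).map
            (fun nm => wrappers.contains nm))
          (false :: ((func_defs.map (fun fd => (List.lookup "name" fd).getD "")).map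
            (fun nm => wrappers.contains nm)).dropLast)).foldl
        (fun (st : Int × List Int) s =>
          let t := st.1 + (if s then 1 else 0); (t, st.2 ++ [t])) (0, [])).2
      = labs (fun nm => wrappers.contains nm)
          (func_defs.map (fun fd => (List.lookup "name" fd).getD "")) false 0 := by
    rw [zip_shift, foldl_sums, sums_startsR]
    simp
  simp only [hfold, hgroups, List.nil_append, hlabels, getLast?_lastD, lastD_labs0,
    grp_fold_FB, dict_fold_FB, FB_false, Int.toNat_natCast, bucket0, foldl_flatMap_dict]
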